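-- pv_equiv track=rewrite | github.com/phyro/ohara | src/merkle.py | _partition_leaves
-- ===== SOURCE A (Python) =====
-- def _partition_leaves(elements):
--
--     def get_partitions(num):
--         rv = []
--         for n in range(50, -1, -1):
--             cur_exp = 2**n
--             if num >= cur_exp:
--                 rv.append(cur_exp)
--                 num -= cur_exp
--         return rv
--
--     partitions = get_partitions(len(elements))
--
--     pos = 0
--     trees = []
--     for partition_len in partitions:
--         trees.append(elements[pos : pos + partition_len])
--         pos += partition_len
--
--     return trees
-- ===== SOURCE B (Python) =====
-- def _partition_leaves(elements):
--     # Single back-to-front pass: walk the bits of n from low to high, and for each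
--     # set bit peel a suffix of that size off the remaining list, prepending it to
--     # the result.  A's exponent scan 50..0 partitions at most the first 2**51 - 1
--     # elements; the min keeps that documented cap.
--     n = min(len(elements), 2**51 - 1)
--     rest = elements[:n]
--     trees = []
--     for k in range(51):
--         if (n >> k) & 1:
--             size = 1 << k
--             trees.insert(0, rest[len(rest) - size:])
--             rest = rest[:len(rest) - size]
--     return trees
-- ===== Notes on version B (the rewrite author's own statement) =====
-- stated objective: alternative
-- what changed: B replaces A's two front-to-back passes (first build the list of power-of-two partition sizes with a greedy range(50,-1,-1) scan, then slice forward at a running position) with a single backward pass: it walks the bits of the length from low to high and, for each set bit, peels a suffix of that size off the remaining list and prepends it to the result; the min(len, 2**51-1) keeps A's documented 51-exponent cap.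
import Mathlib
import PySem

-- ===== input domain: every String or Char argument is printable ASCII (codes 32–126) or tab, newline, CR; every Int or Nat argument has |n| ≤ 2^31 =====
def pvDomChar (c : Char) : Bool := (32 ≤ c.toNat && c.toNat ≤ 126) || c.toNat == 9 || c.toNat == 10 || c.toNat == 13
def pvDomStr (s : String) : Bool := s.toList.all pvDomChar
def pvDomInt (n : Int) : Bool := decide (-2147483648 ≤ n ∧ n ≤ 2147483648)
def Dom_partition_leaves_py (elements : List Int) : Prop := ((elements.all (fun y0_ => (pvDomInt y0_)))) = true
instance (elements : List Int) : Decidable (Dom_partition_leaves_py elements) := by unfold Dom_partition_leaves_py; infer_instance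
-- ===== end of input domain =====

-- B consumes the list from the back in a single pass over the bits of the length (low to high),
-- instead of A's two front-to-back passes; same return value, no argument is mutated.

-- ===== PORT A =====
-- get_partitions: fold over range(50, -1, -1) with state (rv, num); 2**n ported as 2 ^ n.toNat
-- (every n produced by this range is nonnegative, so toNat is exact).
def partition_leaves_py (elements : List Int) : List (List Int) :=
  let partitions :=
    ((PySem.List.pyRange 50 (-1) (-1)).foldl
      (fun (st : List Int × Int) n =>
        let cur_exp : Int := 2 ^ n.toNat
        if st.2 ≥ cur_exp then (st.1 ++ [cur_exp], st.2 - cur_exp) else st)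
      ([], (elements.length : Int))).1
  (partitions.foldl
    (fun (st : List (List Int) × Int) partition_len =>
      (st.1 ++ [PySem.List.slice elements (some st.2) (some (st.2 + partition_len))],
       st.2 + partition_len))
    ([], 0)).1

-- ===== PORT B =====
-- Transliteration of Source B: n = min(len, 2**51-1) is Nat.min (both sides nonnegative);
-- 'for k in range(51)' is a foldl over List.range 51 with state (rest, trees);
-- '(n >> k) & 1' on a nonnegative int is (n >>> k) % 2, exact; the slices
-- rest[len(rest)-size:] / rest[:len(rest)-size] have a nonnegative in-range index
-- (the remaining length always covers the set bit being peeled), so they are exactly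
-- List.drop / List.take; trees.insert(0, x) is x :: trees.
def partition_leaves_py_alt (elements : List Int) : List (List Int) :=
  let n := min elements.length (2 ^ 51 - 1)
  ((List.range 51).foldl
    (fun (st : List Int × List (List Int)) k =>
      if (n >>> k) % 2 = 1 then
        (st.1.take (st.1.length - 2 ^ k), st.1.drop (st.1.length - 2 ^ k) :: st.2)
      else st)
    (elements.take n, ([] : List (List Int)))).2

-- ===== PRECONDITION & SPEC =====
def Spec_partition_leaves_py (elements : List Int) (out : List (List Int)) : Prop := out = partition_leaves_py_alt elements
instance (elements : List Int) (out : List (List Int)) : Decidable (Spec_partition_leaves_py elements out) := by unfold Spec_partition_leaves_py; infer_instance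

-- ===== CLAIM (what is proved, stated in full; the proofs are below) =====
def Claim_equal_partition_leaves_py : Prop := ∀ (elements : List Int), Dom_partition_leaves_py elements → Spec_partition_leaves_py elements (partition_leaves_py elements)

-- ===== LEMMAS AND PROOFS =====

-- The descending exponent list [k, k-1, …, 0], matching range(50, -1, -1) at k = 50.
def expList : Nat → List Int
  | 0 => [0]
  | k + 1 => ((k + 1 : Nat) : Int) :: expList k

lemma pyRange_eq_expList : PySem.List.pyRange 50 (-1) (-1) = expList 50 := by decide

-- Greedy binary decomposition of num using exponents k, k-1, …, 0 (Nat version).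
def binDecN : Nat → Nat → List Nat
  | 0, num => if 1 ≤ num then [1] else []
  | k + 1, num => if 2 ^ (k + 1) ≤ num then 2 ^ (k + 1) :: binDecN k (num - 2 ^ (k + 1)) else binDecN k num

lemma binDecN_zero : ∀ k, binDecN k 0 = [] := by
  intro k; induction k with
  | zero => simp [binDecN]
  | succ k ih =>
    rw [binDecN, if_neg (by have := Nat.one_le_two_pow (n := k + 1); omega)]
    exact ih

lemma binDecN_skip (k m : Nat) (h : m < 2 ^ (k + 1)) : binDecN (k + 1) m = binDecN k m := by
  simp [binDecN, Nat.not_le.mpr h]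

-- Peeling the highest set bit: for 0 < n < 2^(k+1), binDecN k n starts with 2^(log2 n).
lemma binDecN_peel : ∀ k n, 0 < n → n < 2 ^ (k + 1) →
    binDecN k n = 2 ^ Nat.log2 n :: binDecN k (n - 2 ^ Nat.log2 n) := by
  intro k
  induction k with
  | zero =>
    intro n h1 h2
    interval_cases n
    decide
  | succ k ih =>
    intro n h1 h2
    by_cases hc : 2 ^ (k + 1) ≤ n
    · have hlg : Nat.log2 n = k + 1 := by
        have hne : n ≠ 0 := by omega
        have h3 := (Nat.log2_lt hne (k := k + 2)).mpr h2
        have h4 : ¬ Nat.log2 n < k + 1 := by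
          intro hlt
          exact absurd ((Nat.log2_lt hne).mp hlt) (by omega)
        omega
      have hrest : n - 2 ^ (k + 1) < 2 ^ (k + 1) := by
        have : 2 ^ (k + 2) = 2 ^ (k + 1) + 2 ^ (k + 1) := by ring
        omega
      rw [hlg, binDecN_skip k _ hrest]
      simp only [binDecN, if_pos hc]
    · have hn2 : n < 2 ^ (k + 1) := Nat.not_le.mp hc
      have hsub : n - 2 ^ Nat.log2 n < 2 ^ (k + 1) := lt_of_le_of_lt (Nat.sub_le _ _) hn2
      rw [binDecN_skip k n hn2, binDecN_skip k _ hsub]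
      exact ih n h1 hn2

-- For num ≥ 2^(k+1) - 1 the greedy scan takes every power: binDecN saturates.
lemma binDecN_full : ∀ k num, 2 ^ (k + 1) - 1 ≤ num → binDecN k num = binDecN k (2 ^ (k + 1) - 1) := by
  intro k
  induction k with
  | zero => intro num h; simp only [binDecN]; rw [if_pos (by omega), if_pos (by norm_num)]
  | succ k ih =>
    intro num h
    have hp : (2:Nat) ^ (k + 2) = 2 ^ (k + 1) + 2 ^ (k + 1) := by ring
    have h1 : 2 ^ (k + 1) ≤ num := by omega
    have h2 : (2:Nat) ^ (k + 1) ≤ 2 ^ (k + 2) - 1 := by omega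
    simp only [binDecN, if_pos h1, if_pos h2]
    rw [ih (num - 2 ^ (k + 1)) (by omega), show 2 ^ (k + 2) - 1 - 2 ^ (k + 1) = 2 ^ (k + 1) - 1 by omega]

lemma binDecN_sum_le : ∀ k num, (binDecN k num).sum ≤ num := by
  intro k
  induction k with
  | zero => intro num; by_cases h : 1 ≤ num <;> simp [binDecN, h]
  | succ k ih =>
    intro num
    by_cases h : 2 ^ (k + 1) ≤ num
    · simp only [binDecN, if_pos h, List.sum_cons]
      have := ih (num - 2 ^ (k + 1)); omega
    · simp only [binDecN, if_neg h]; exact ih num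

-- Int version of the decomposition, matching A's fold state arithmetic.
def binDec : Nat → Int → List Int
  | 0, num => if num ≥ 1 then [(1 : Int)] else []
  | k + 1, num => if num ≥ 2 ^ (k + 1) then ((2 : Int) ^ (k + 1)) :: binDec k (num - 2 ^ (k + 1)) else binDec k num

lemma binDec_natCast : ∀ k (n : Nat), binDec k (n : Int) = (binDecN k n).map (fun (m : Nat) => (m : Int)) := by
  intro k
  induction k with
  | zero =>
    intro n
    by_cases h : 1 ≤ n
    · simp [binDec, binDecN, h, show ((n : Int) ≥ 1) by exact_mod_cast h]
    · have : n = 0 := by omega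
      subst this; simp [binDec, binDecN]
  | succ k ih =>
    intro n
    by_cases h : 2 ^ (k + 1) ≤ n
    · have h' : (n : Int) ≥ 2 ^ (k + 1) := by exact_mod_cast h
      have hsub : ((n : Int) - 2 ^ (k + 1)) = ((n - 2 ^ (k + 1) : Nat) : Int) := by
        push_cast [h]; ring
      simp only [binDec, binDecN, if_pos h, ge_iff_le, if_pos h', hsub, ih]
      norm_num
    · have h' : ¬ (n : Int) ≥ 2 ^ (k + 1) := by
        simp only [ge_iff_le, not_le] at *; exact_mod_cast h
      simp only [binDec, binDecN, if_neg h, ge_iff_le] at *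
      rw [if_neg (by simpa using h'), ih]

-- A's first fold over expList k computes rv ++ binDec k num.
lemma foldA_eq_binDec : ∀ k (rv : List Int) (num : Int),
    ((expList k).foldl
      (fun (st : List Int × Int) n =>
        let cur_exp : Int := 2 ^ n.toNat
        if st.2 ≥ cur_exp then (st.1 ++ [cur_exp], st.2 - cur_exp) else st)
      (rv, num)).1 = rv ++ binDec k num := by
  intro k
  induction k with
  | zero =>
    intro rv num
    simp only [expList, List.foldl_cons, List.foldl_nil, binDec, Int.toNat_zero, pow_zero]
    split_ifs with h
    · simp
    · simp
  | succ k ih =>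
    intro rv num
    have ht : (((k + 1 : Nat) : Int)).toNat = k + 1 := by simp
    simp only [expList, List.foldl_cons, ht, binDec]
    split_ifs with h
    · rw [ih]; simp
    · rw [ih]

-- Pure chunking: successive take/drop by the listed sizes.
def chunksN (xs : List Int) : List Nat → List (List Int)
  | [] => []
  | p :: ps => xs.take p :: chunksN (xs.drop p) ps

-- A's second fold, run over Nat sizes from position pos, appends chunksN of the dropped suffix.
lemma foldChunks_eq_chunksN (elements : List Int) : ∀ (ps : List Nat) (acc : List (List Int)) (pos : Nat),
    (((ps.map (fun (m : Nat) => (m : Int))).foldl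
      (fun (st : List (List Int) × Int) partition_len =>
        (st.1 ++ [PySem.List.slice elements (some st.2) (some (st.2 + partition_len))],
         st.2 + partition_len))
      (acc, (pos : Int))).1) = acc ++ chunksN (elements.drop pos) ps := by
  intro ps
  induction ps with
  | nil => intro acc pos; simp [chunksN]
  | cons p ps ih =>
    intro acc pos
    simp only [List.map_cons, List.foldl_cons, chunksN]
    have hslice : PySem.List.slice elements (some (pos : Int)) (some ((pos : Int) + (p : Int)))
        = (elements.drop pos).take p := PySem.List.slice_natCast_add elements pos p
    have hpos : ((pos : Int) + (p : Int)) = ((pos + p : Nat) : Int) := by push_cast; ring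
    rw [hslice, hpos, ih]
    simp [List.append_assoc, List.drop_drop, Nat.add_comm]

-- Chunking only reads the first (sum of sizes) elements.
lemma chunksN_take : ∀ (ps : List Nat) (xs : List Int) (m : Nat), ps.sum ≤ m →
    chunksN xs ps = chunksN (xs.take m) ps := by
  intro ps
  induction ps with
  | nil => intro xs m _; simp [chunksN]
  | cons p ps ih =>
    intro xs m h
    simp only [List.sum_cons] at h
    simp only [chunksN]
    rw [List.take_take, Nat.min_eq_left (by omega), List.drop_take,
        ih (xs.drop p) (m - p) (by omega)]

lemma log2_eq_of (k n : Nat) (h1 : 2 ^ k ≤ n) (h2 : n < 2 ^ (k + 1)) : Nat.log2 n = k := by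
  have hne : n ≠ 0 := by have := Nat.one_le_two_pow (n := k); omega
  have h3 := (Nat.log2_lt hne (k := k + 1)).mpr h2
  have h4 : ¬ Nat.log2 n < k := fun hlt => absurd ((Nat.log2_lt hne).mp hlt) (by omega)
  omega

-- Invariant of B's fold: after processing bits 0..k-1 of m, the suffix of length m % 2^k
-- has been peeled off and chunked, in descending-size order.
lemma foldB_inv (xs : List Int) (m : Nat) (hxs : xs.length = m) (hm : m < 2 ^ 51) :
    ∀ k, k ≤ 51 →
      (List.range k).foldl
        (fun (st : List Int × List (List Int)) k =>
          if (m >>> k) % 2 = 1 then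
            (st.1.take (st.1.length - 2 ^ k), st.1.drop (st.1.length - 2 ^ k) :: st.2)
          else st)
        (xs, ([] : List (List Int)))
      = (xs.take (m - m % 2 ^ k), chunksN (xs.drop (m - m % 2 ^ k)) (binDecN 50 (m % 2 ^ k))) := by
  intro k
  induction k with
  | zero =>
    intro _
    simp [List.range_zero, Nat.mod_one, binDecN_zero, chunksN, ← hxs]
  | succ k ih =>
    intro hk
    rw [List.range_succ, List.foldl_append, ih (by omega), List.foldl_cons, List.foldl_nil]
    have hsh : m >>> k = m / 2 ^ k := Nat.shiftRight_eq_div_pow m k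
    have hmod : m % (2 ^ k * 2) = m % 2 ^ k + 2 ^ k * (m / 2 ^ k % 2) := Nat.mod_mul
    have hpow : (2:Nat) ^ (k + 1) = 2 ^ k * 2 := by ring
    have hrle : m % 2 ^ k ≤ m := Nat.mod_le m _
    have hrle' : m % 2 ^ (k + 1) ≤ m := Nat.mod_le m _
    have hlen : (xs.take (m - m % 2 ^ k)).length = m - m % 2 ^ k := by
      simp [hxs]
    by_cases hb : m / 2 ^ k % 2 = 1
    · have hr' : m % 2 ^ (k + 1) = m % 2 ^ k + 2 ^ k := by rw [hpow, hmod, hb]; ring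
      rw [if_pos (by rw [hsh]; exact hb)]
      have harith : m - m % 2 ^ k - 2 ^ k = m - m % 2 ^ (k + 1) := by omega
      have hlog : Nat.log2 (m % 2 ^ (k + 1)) = k :=
        log2_eq_of k _ (by omega) (by have := Nat.mod_lt m (y := 2 ^ (k+1)) (by positivity); omega)
      have hpeel : binDecN 50 (m % 2 ^ (k + 1))
          = 2 ^ k :: binDecN 50 (m % 2 ^ k) := by
        rw [binDecN_peel 50 (m % 2 ^ (k + 1)) (by omega)
              (lt_of_le_of_lt hrle' hm), hlog, show m % 2 ^ (k + 1) - 2 ^ k = m % 2 ^ k by omega]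
      have e1 : (xs.take (m - m % 2 ^ k)).take (m - m % 2 ^ k - 2 ^ k) = xs.take (m - m % 2 ^ (k+1)) := by
        rw [List.take_take, harith, Nat.min_eq_left (by omega)]
      have e2 : (xs.take (m - m % 2 ^ k)).drop (m - m % 2 ^ k - 2 ^ k) = (xs.drop (m - m % 2 ^ (k+1))).take (2 ^ k) := by
        rw [List.drop_take, harith, show m - m % 2 ^ k - (m - m % 2 ^ (k+1)) = 2 ^ k by omega]
      have e3 : xs.drop (m - m % 2 ^ k) = (xs.drop (m - m % 2 ^ (k+1))).drop (2 ^ k) := by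
        rw [List.drop_drop, show m - m % 2 ^ (k+1) + 2 ^ k = m - m % 2 ^ k by omega]
      rw [hpeel]
      simp only [chunksN, hlen, e1, e2, e3]
    · have hb0 : m / 2 ^ k % 2 = 0 := by omega
      have hr' : m % 2 ^ (k + 1) = m % 2 ^ k := by rw [hpow, hmod, hb0]; ring_nf
      rw [if_neg (by rw [hsh, hb0]; simp), hr']

-- ===== VERDICT (by name: the statement is the Claim_ definition above) =====
theorem partition_leaves_py_spec : Claim_equal_partition_leaves_py := by
  intro elements _hdom
  unfold Spec_partition_leaves_py partition_leaves_py partition_leaves_py_alt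
  rw [pyRange_eq_expList]
  simp only [foldA_eq_binDec, List.nil_append]
  rw [binDec_natCast, show ((0 : Int)) = ((0 : Nat) : Int) from rfl,
      foldChunks_eq_chunksN elements (binDecN 50 elements.length) [] 0]
  have hm51 : min elements.length (2 ^ 51 - 1) < 2 ^ 51 := by omega
  have hlenm : (elements.take (min elements.length (2 ^ 51 - 1))).length
      = min elements.length (2 ^ 51 - 1) := by simp
  rw [foldB_inv _ _ hlenm hm51 51 (le_refl _)]
  rw [Nat.mod_eq_of_lt hm51]
  simp only [Nat.sub_self, List.drop_zero, List.nil_append]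
  have hdec : binDecN 50 elements.length = binDecN 50 (min elements.length (2 ^ 51 - 1)) := by
    by_cases h : elements.length ≤ 2 ^ 51 - 1
    · rw [Nat.min_eq_left h]
    · rw [Nat.min_eq_right (by omega)]
      exact binDecN_full 50 elements.length (by omega)
  rw [hdec]
  exact chunksN_take _ elements _ (binDecN_sum_le _ _)
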